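-- pv_equiv track=rewrite | github.com/chanminmun/algorithm | week10/week10-2.py | solution
-- ===== SOURCE A (Python) =====
-- def solution(n):
--     answer = 0
--     a = []
--     for i in range(2,n):
--         if n%i == 1:
--             a.append(i)
--     a.sort()
--     answer = int(a[0])
--     return answer
-- ===== SOURCE B (Python) =====
-- def solution(n):
--     # smallest i >= 2 with n % i == 1  ==  smallest divisor >= 2 of n-1,
--     # found by trial division up to sqrt(n-1)
--     m = n - 1
--     d = 2
--     while d * d <= m:
--         if m % d == 0:
--             return d
--         d += 1
--     return m
-- ===== Notes on version B (the rewrite author's own statement) =====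
-- stated objective: faster
-- what changed: A filters all i in range(2,n) for n%i==1, sorts and takes the first; B returns the smallest divisor >=2 of n-1 by trial division up to sqrt(n-1).
-- outside the precondition, e.g. on solution(2): A raises IndexError, B returns 1; on solution(1): A raises IndexError, B returns 0
import Mathlib
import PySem

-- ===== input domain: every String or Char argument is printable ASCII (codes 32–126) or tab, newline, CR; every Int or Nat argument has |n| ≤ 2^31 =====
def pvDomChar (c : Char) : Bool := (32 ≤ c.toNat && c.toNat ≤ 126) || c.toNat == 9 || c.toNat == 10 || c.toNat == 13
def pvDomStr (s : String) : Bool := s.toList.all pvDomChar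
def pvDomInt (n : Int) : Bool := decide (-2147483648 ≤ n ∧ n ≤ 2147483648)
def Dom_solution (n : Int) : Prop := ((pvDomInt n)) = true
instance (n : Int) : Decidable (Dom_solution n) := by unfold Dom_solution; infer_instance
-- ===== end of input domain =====

-- B changes the algorithm: instead of filtering all of range(2,n) and sorting, it does
-- trial division on n-1 up to its square root (objective: faster, asymptotically).

-- ===== PORT A =====
def solution (n : Int) : Int :=
  let a := (PySem.List.pyRange 2 n 1).foldl
    (fun acc i => if PySem.Int.mod n i == 1 then acc ++ [i] else acc) []
  let a2 := PySem.List.sorted a (fun x => x) false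
  -- Python raises IndexError on a2[0] when the list is empty (n ≤ 2); excluded by Pre_solution
  ((PySem.List.pyGet? a2 0).getD 0)

-- ===== PORT B =====
-- the while loop of Source B; fuel is a totality device only (fuel = (n-1).toNat always suffices)
def spfLoop (m : Int) : Nat → Int → Int
  | 0, _ => m
  | fuel+1, d => if d * d ≤ m then (if PySem.Int.mod m d == 0 then d else spfLoop m fuel (d+1)) else m

def solution_alt (n : Int) : Int := spfLoop (n - 1) (n - 1).toNat 2

-- ===== PRECONDITION & SPEC =====
-- Pre_ excludes exactly n ≤ 2, where A's list is empty and a[0] raises IndexError.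
def Pre_solution (n : Int) : Prop := 3 ≤ n
instance (n : Int) : Decidable (Pre_solution n) := by unfold Pre_solution; infer_instance
def pvWitness_solution : Int := 10

def Spec_solution (n : Int) (out : Int) : Prop := out = solution_alt n
instance (n : Int) (out : Int) : Decidable (Spec_solution n out) := by unfold Spec_solution; infer_instance

-- ===== CLAIM (what is proved, stated in full; the proofs are below) =====
def Claim_equal_solution : Prop := ∀ (n : Int), Dom_solution n → Pre_solution n → Spec_solution n (solution n)

-- ===== LEMMAS AND PROOFS =====

-- n % i = 1 (Python mod) is divisibility of n-1, for i ≥ 2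
lemma mod_eq_one_iff_dvd (n i : Int) (hi : 2 ≤ i) : PySem.Int.mod n i = 1 ↔ i ∣ (n - 1) := by
  rw [PySem.Int.mod_eq_emod_of_pos (show (0:Int) < i by omega)]
  constructor
  · intro h
    have h1 : (1 : Int) % i = 1 := Int.emod_eq_of_lt (by norm_num) (by omega)
    have : (n - 1) % i = 0 := by
      rw [Int.sub_emod, h, h1]
      simp
    exact Int.dvd_of_emod_eq_zero this
  · intro ⟨k, hk⟩
    have h1 : n = 1 + i * k := by omega
    have : n % i = 1 % i := by
      rw [h1]; rw [Int.add_mul_emod_self_left]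
    rw [this, Int.emod_eq_of_lt (by norm_num) (by omega)]

-- minFac = d when d divides M and nothing smaller ≥ 2 does
lemma minFac_eq_of_dvd (M d : Nat) (hM : 2 ≤ M) (hd2 : 2 ≤ d) (hdvd : d ∣ M)
    (hinv : ∀ e, 2 ≤ e → e < d → ¬ e ∣ M) : M.minFac = d := by
  have hf2 : 2 ≤ M.minFac := (Nat.minFac_prime (by omega)).two_le
  have hfd : M.minFac ∣ M := Nat.minFac_dvd M
  have h1 : M.minFac ≤ d := Nat.minFac_le_of_dvd hd2 hdvd
  have h2 : d ≤ M.minFac := by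
    by_contra h
    exact hinv M.minFac hf2 (by omega) hfd
  omega

-- minFac = M when nothing below the square-root bound divides M
lemma minFac_eq_self_of_no_small (M d : Nat) (hM : 2 ≤ M) (hlt : M < d * d)
    (hinv : ∀ e, 2 ≤ e → e < d → ¬ e ∣ M) : M.minFac = M := by
  set f := M.minFac with hf
  have hf2 : 2 ≤ f := (Nat.minFac_prime (by omega)).two_le
  have hfd : f ∣ M := Nat.minFac_dvd M
  have hfM : f ≤ M := Nat.minFac_le (by omega)
  have hdf : d ≤ f := by
    by_contra h
    exact hinv f hf2 (by omega) hfd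
  by_contra hne
  have hflt : f < M := lt_of_le_of_ne hfM hne
  set q := M / f with hq
  have hqM : f * q = M := Nat.mul_div_cancel' hfd
  have hq2 : 2 ≤ q := by
    rcases Nat.lt_or_ge q 2 with h | h
    · interval_cases q <;> omega
    · exact h
  have hqdvd : q ∣ M := Nat.div_dvd_of_dvd hfd
  have hfq : f ≤ q := Nat.minFac_le_of_dvd hq2 hqdvd
  have key : M < M := by
    calc M < d * d := hlt
      _ ≤ f * f := Nat.mul_le_mul hdf hdf
      _ ≤ f * q := Nat.mul_le_mul_left f hfq
      _ = M := hqM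
  exact lt_irrefl M key

-- the trial-division loop computes minFac
lemma spfLoop_eq_minFac (M : Nat) (hM : 2 ≤ M) :
    ∀ (fuel d : Nat), 2 ≤ d → M < d + fuel → (∀ e, 2 ≤ e → e < d → ¬ e ∣ M) →
      spfLoop (M : Int) fuel (d : Int) = (M.minFac : Int) := by
  intro fuel
  induction fuel with
  | zero =>
    intro d hd2 hfuel hinv
    exact absurd (dvd_refl M) (hinv M hM (by omega))
  | succ fuel ih =>
    intro d hd2 hfuel hinv
    rw [spfLoop]
    by_cases hdd : (d : Int) * (d : Int) ≤ (M : Int)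
    · rw [if_pos hdd]
      by_cases hdvd : (d : Int) ∣ (M : Int)
      · have hmod : PySem.Int.mod (M : Int) (d : Int) = 0 :=
          (PySem.Int.mod_eq_zero_iff_dvd _ _).mpr hdvd
        rw [hmod]
        simp only [beq_self_eq_true, if_pos]
        have : M.minFac = d :=
          minFac_eq_of_dvd M d hM hd2 (by exact_mod_cast hdvd) hinv
        rw [this]
      · have hmod : PySem.Int.mod (M : Int) (d : Int) ≠ 0 := by
          intro h; exact hdvd ((PySem.Int.mod_eq_zero_iff_dvd _ _).mp h)
        rw [if_neg (by simpa using hmod)]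
        have hcast : (d : Int) + 1 = ((d + 1 : Nat) : Int) := by push_cast; ring
        rw [hcast]
        apply ih (d + 1) (by omega) (by omega)
        intro e he2 helt
        rcases Nat.lt_or_ge e d with h | h
        · exact hinv e he2 h
        · have : e = d := by omega
          subst this
          intro hdvdN
          exact hdvd (by exact_mod_cast hdvdN)
    · rw [if_neg hdd]
      have hlt : M < d * d := by exact_mod_cast not_le.mp hdd
      rw [minFac_eq_self_of_no_small M d hM hlt hinv]

-- first element of a filtered strictly increasing list is the least element satisfying p
lemma head?_filter_eq (p : Int → Bool) (x : Int) :
    ∀ (L : List Int), L.Pairwise (· < ·) → x ∈ L → p x = true →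
      (∀ y ∈ L, p y = true → x ≤ y) → (L.filter p).head? = some x := by
  intro L
  induction L with
  | nil => intro _ hx; exact absurd hx (List.not_mem_nil)
  | cons y t ih =>
    intro hpw hx hpx hmin
    by_cases hpy : p y = true
    · have hxy : x ≤ y := hmin y (List.mem_cons_self) hpy
      have hyx : y ≤ x := by
        rcases List.mem_cons.mp hx with h | h
        · omega
        · have := (List.pairwise_cons.mp hpw).1 x h
          omega
      have : x = y := le_antisymm hxy hyx
      subst this
      simp [hpy]
    · have hxt : x ∈ t := by
        rcases List.mem_cons.mp hx with h | h
        · subst h; exact absurd hpx hpy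
        · exact h
      rw [List.filter_cons, if_neg (by simpa using hpy)]
      exact ih (List.pairwise_cons.mp hpw).2 hxt hpx
        (fun z hz hpz => hmin z (List.mem_cons_of_mem _ hz) hpz)

-- A computes (n-1).toNat.minFac for n ≥ 3
lemma solution_eq_minFac (n : Int) (hn : 3 ≤ n) :
    solution n = ((n - 1).toNat.minFac : Int) := by
  set M := (n - 1).toNat with hMdef
  have hMn : (M : Int) = n - 1 := Int.toNat_of_nonneg (by omega)
  have hM2 : 2 ≤ M := by omega
  have hf2 : 2 ≤ M.minFac := (Nat.minFac_prime (by omega)).two_le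
  have hfM : M.minFac ≤ M := Nat.minFac_le (by omega)
  have hfdvd : ((M.minFac : Int)) ∣ (n - 1) := by
    rw [← hMn]; exact_mod_cast Nat.minFac_dvd M
  set p : Int → Bool := fun i => PySem.Int.mod n i == 1 with hp
  unfold solution
  rw [PySem.List.foldl_append_if p (fun i => i)]
  simp only [List.nil_append, List.map_id']
  have hpw : ((PySem.List.pyRange 2 n 1).filter p).Pairwise
      (fun a b => (fun x => x) a < (fun x => x) b) :=
    List.Pairwise.filter p (PySem.List.pairwise_lt_pyRange_one 2 n)
  rw [PySem.List.sorted_eq_of_perm_of_pairwise_lt _ _ (fun x => x) (List.Perm.refl _) hpw]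
  rw [PySem.List.pyGet?_zero]
  rw [← List.head?_eq_getElem?]
  have hhead : ((PySem.List.pyRange 2 n 1).filter p).head? = some ((M.minFac : Int)) := by
    apply head?_filter_eq p _ _ (PySem.List.pairwise_lt_pyRange_one 2 n)
    · rw [PySem.List.mem_pyRange_one]
      constructor
      · exact_mod_cast hf2
      · have : (M.minFac : Int) ≤ (M : Int) := by exact_mod_cast hfM
        omega
    · simp only [hp, beq_iff_eq]
      exact (mod_eq_one_iff_dvd n _ (by exact_mod_cast hf2)).mpr hfdvd
    · intro y hy hpy
      rw [PySem.List.mem_pyRange_one] at hy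
      have hydvd : y ∣ (n - 1) := by
        simp only [hp, beq_iff_eq] at hpy
        exact (mod_eq_one_iff_dvd n y hy.1).mp hpy
      have hyN : (y.toNat : Int) = y := Int.toNat_of_nonneg (by omega)
      have hydvdN : y.toNat ∣ M := by
        rw [← Int.natCast_dvd_natCast, hyN, hMn]; exact hydvd
      have := Nat.minFac_le_of_dvd (by omega) hydvdN
      omega
  rw [hhead]
  rfl

-- ===== VERDICT (by name: the statement is the Claim_ definition above) =====
theorem solution_spec : Claim_equal_solution := by
  intro n _ hpre
  unfold Spec_solution solution_alt
  have hn : 3 ≤ n := hpre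
  set M := (n - 1).toNat with hMdef
  have hMn : (M : Int) = n - 1 := Int.toNat_of_nonneg (by omega)
  rw [solution_eq_minFac n hn, ← hMn]
  rw [show (2 : Int) = ((2 : Nat) : Int) by norm_num]
  exact (spfLoop_eq_minFac M (by omega) M 2 (by omega) (by omega)
    (fun e he2 helt => by omega)).symm
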